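-- pv_equiv track=rewrite | github.com/vivirodrigues/geneticAlgorithm | maximization.py | bestIndividual
-- ===== SOURCE A (Python) =====
-- def bestIndividual(fitness,population):
--
-- 	minimo = fitness[0]
-- 	indice = 0
--
-- 	for i in range(len(fitness)):
-- 		if fitness[i] > minimo:
-- 			minimo = fitness[i]
-- 			indice = i
-- 	return population[indice]
-- ===== SOURCE B (Python) =====
-- def bestIndividual(fitness, population):
--     order = sorted(range(len(fitness)), key=lambda i: (-fitness[i], i))
--     return population[order[0]]
-- ===== Notes on version B (the rewrite author's own statement) =====
-- stated objective: alternative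
-- what changed: Replaced the running-max/running-index scan with a sort: indices are sorted by the key (-fitness[i], i) and the population row at the first index of the sorted order is returned.
import Mathlib
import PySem

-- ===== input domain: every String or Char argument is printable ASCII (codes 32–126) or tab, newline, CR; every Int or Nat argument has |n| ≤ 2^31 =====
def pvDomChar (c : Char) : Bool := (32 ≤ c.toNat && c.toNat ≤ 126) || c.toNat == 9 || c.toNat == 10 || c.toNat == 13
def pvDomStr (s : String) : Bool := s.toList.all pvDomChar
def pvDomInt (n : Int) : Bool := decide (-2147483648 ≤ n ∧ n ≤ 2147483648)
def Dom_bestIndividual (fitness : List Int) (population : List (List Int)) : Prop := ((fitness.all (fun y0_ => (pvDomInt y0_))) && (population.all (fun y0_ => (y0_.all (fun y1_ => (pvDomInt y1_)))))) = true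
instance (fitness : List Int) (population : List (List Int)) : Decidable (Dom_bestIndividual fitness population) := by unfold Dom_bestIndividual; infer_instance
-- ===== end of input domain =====

-- B replaces A's running-max index scan with a different algorithm: sort the indices by the
-- key (-fitness[i], i) and take the population row at the head of the sorted order (alternative, not faster).

-- ===== PORT A =====
def bestIndividual (fitness : List Int) (population : List (List Int)) : List Int :=
  let minimo := PySem.List.pyGetD fitness 0 0
  let st :=
    (PySem.List.pyRange 0 (fitness.length : Int) 1).foldl
      (fun (st : Int × Int) i =>
        if PySem.List.pyGetD fitness i 0 > st.1 then (PySem.List.pyGetD fitness i 0, i) else st)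
      (minimo, 0)
  PySem.List.pyGetD population st.2 []

-- ===== PORT B =====
def bestIndividual_alt (fitness : List Int) (population : List (List Int)) : List Int :=
  let order := PySem.List.sorted2 (PySem.List.pyRange 0 (fitness.length : Int) 1)
      (fun i => -(PySem.List.pyGetD fitness i 0)) (fun i => i) false
  PySem.List.pyGetD population (PySem.List.pyGetD order 0 0) []

-- ===== PRECONDITION & SPEC =====
-- Pre_ = exactly the inputs where A returns: fitness nonempty (else fitness[0] raises IndexError)
-- and the first index of the maximum of fitness is a valid index into population
-- (else population[indice] raises IndexError).  B raises on exactly the same inputs.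
def Pre_bestIndividual (fitness : List Int) (population : List (List Int)) : Prop :=
  fitness ≠ [] ∧ List.idxOf (fitness.foldl max (fitness.headD 0)) fitness < population.length
instance (fitness : List Int) (population : List (List Int)) : Decidable (Pre_bestIndividual fitness population) := by unfold Pre_bestIndividual; infer_instance

def pvWitness_bestIndividual : List Int × List (List Int) := ([1, 3, 2], [[1], [2], [3]])

def Spec_bestIndividual (fitness : List Int) (population : List (List Int)) (out : List Int) : Prop := out = bestIndividual_alt fitness population
instance (fitness : List Int) (population : List (List Int)) (out : List Int) : Decidable (Spec_bestIndividual fitness population out) := by unfold Spec_bestIndividual; infer_instance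

-- ===== CLAIM (what is proved, stated in full; the proofs are below) =====
def Claim_equal_bestIndividual : Prop := ∀ (fitness : List Int) (population : List (List Int)), Dom_bestIndividual fitness population → Pre_bestIndividual fitness population → Spec_bestIndividual fitness population (bestIndividual fitness population)

-- ===== LEMMAS AND PROOFS =====

/-- one step of insertion exposes its head. -/
theorem pvInsertBy_cons (before : Int → Int → Bool) (x h : Int) (t : List Int) :
    PySem.List.insertBy before x (h :: t)
      = if before x h then x :: h :: t else h :: PySem.List.insertBy before x t := by
  simp [PySem.List.insertBy]

/-- insertion into the empty list. -/
theorem pvInsertBy_nil (before : Int → Int → Bool) (x : Int) :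
    PySem.List.insertBy before x [] = [x] := by
  simp [PySem.List.insertBy]

/-- the head of the insertion-sort fold is the `before`-minimum scan of the inserted elements. -/
theorem pvFoldInsert_head (before : Int → Int → Bool) :
    ∀ (idxs : List Int) (h : Int) (t : List Int), ∃ t',
      idxs.foldl (fun acc x => PySem.List.insertBy before x acc) (h :: t)
        = (idxs.foldl (fun j i => if before i j then i else j) h) :: t' := by
  intro idxs
  induction idxs with
  | nil => intro h t; exact ⟨t, rfl⟩
  | cons x rest ih =>
      intro h t
      simp only [List.foldl_cons, pvInsertBy_cons]
      by_cases hb : before x h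
      · simpa [hb] using ih x (h :: t)
      · simpa [hb] using ih h (PySem.List.insertBy before x t)

/-- pyRange with step 1 is strictly increasing and bounded below by its start. -/
theorem pvPyRange_sorted : ∀ (n : Nat) (a b : Int), (b - a).toNat = n →
    (PySem.List.pyRange a b).Pairwise (· < ·) ∧ ∀ i ∈ PySem.List.pyRange a b, a ≤ i := by
  intro n
  induction n with
  | zero =>
      intro a b hn
      rw [PySem.List.pyRange_one_eq_nil (by omega)]
      simp
  | succ n ih =>
      intro a b hn
      rw [PySem.List.pyRange_one_cons (by omega)]
      obtain ⟨hp, hlb⟩ := ih (a + 1) b (by omega)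
      refine ⟨List.pairwise_cons.mpr ⟨fun i hi => by have := hlb i hi; omega, hp⟩, ?_⟩
      intro i hi
      rcases List.mem_cons.mp hi with rfl | hi
      · exact le_rfl
      · have := hlb i hi; omega

/-- on indices arriving in increasing order above the accumulator, the lexicographic
`before` of B degenerates to the strict fitness comparison of A's loop. -/
theorem pvScan_eq (f : List Int) :
    ∀ (idxs : List Int) (j : Int), idxs.Pairwise (· < ·) → (∀ i ∈ idxs, j < i) →
      idxs.foldl (fun j i =>
          if (decide ((-(PySem.List.pyGetD f i 0)) < (-(PySem.List.pyGetD f j 0))) ||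
              (!decide ((-(PySem.List.pyGetD f j 0)) < (-(PySem.List.pyGetD f i 0))) && decide (i < j)))
          then i else j) j
      = idxs.foldl (fun j i => if PySem.List.pyGetD f j 0 < PySem.List.pyGetD f i 0 then i else j) j := by
  intro idxs
  induction idxs with
  | nil => intro j _ _; rfl
  | cons x rest ih =>
      intro j hp hlt
      have hjx : j < x := hlt x (List.mem_cons_self ..)
      have hnot : decide (x < j) = false := by simp; omega
      obtain ⟨hx, hp'⟩ := List.pairwise_cons.mp hp
      simp only [List.foldl_cons, hnot, Bool.and_false, Bool.or_false]
      have hcond : (decide ((-(PySem.List.pyGetD f x 0)) < (-(PySem.List.pyGetD f j 0))))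
          = decide (PySem.List.pyGetD f j 0 < PySem.List.pyGetD f x 0) := by
        simp
      rw [hcond]
      by_cases hc : PySem.List.pyGetD f j 0 < PySem.List.pyGetD f x 0
      · simp only [hc, decide_true]
        exact ih x hp' (fun i hi => hx i hi)
      · simp only [hc, decide_false, Bool.false_eq_true]
        exact ih j hp' (fun i hi => lt_trans hjx (hx i hi))
      
/-- A's loop carries the invariant minimo = fitness[indice]; its index component is
the plain argmax scan. -/
theorem pvALoop_eq (f : List Int) :
    ∀ (idxs : List Int) (j : Int),
      idxs.foldl (fun (st : Int × Int) i =>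
          if PySem.List.pyGetD f i 0 > st.1 then (PySem.List.pyGetD f i 0, i) else st)
        (PySem.List.pyGetD f j 0, j)
      = (PySem.List.pyGetD f (idxs.foldl (fun j i => if PySem.List.pyGetD f j 0 < PySem.List.pyGetD f i 0 then i else j) j) 0,
         idxs.foldl (fun j i => if PySem.List.pyGetD f j 0 < PySem.List.pyGetD f i 0 then i else j) j) := by
  intro idxs
  induction idxs with
  | nil => intro j; rfl
  | cons x rest ih =>
      intro j
      simp only [List.foldl_cons]
      by_cases hc : PySem.List.pyGetD f j 0 < PySem.List.pyGetD f x 0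
      · rw [if_pos (by exact hc), if_pos hc]; exact ih x
      · rw [if_neg (by exact hc), if_neg hc]; exact ih j

-- ===== VERDICT (by name: the statement is the Claim_ definition above) =====
theorem bestIndividual_spec : Claim_equal_bestIndividual := by
  intro fitness population _ hpre
  obtain ⟨hne, _⟩ := hpre
  have hlen : (0 : Int) < (fitness.length : Int) := by
    cases fitness with
    | nil => exact absurd rfl hne
    | cons x t => exact_mod_cast Nat.succ_pos t.length
  unfold Spec_bestIndividual bestIndividual bestIndividual_alt
  have hcons := PySem.List.pyRange_one_cons hlen
  obtain ⟨hp, hlb⟩ := pvPyRange_sorted ((fitness.length : Int) - 1).toNat 1 (fitness.length : Int) rfl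
  -- A's side
  rw [hcons]
  simp only [zero_add, List.foldl_cons]
  have hA0 : (if PySem.List.pyGetD fitness 0 0 > PySem.List.pyGetD fitness 0 0
      then (PySem.List.pyGetD fitness 0 0, (0 : Int)) else (PySem.List.pyGetD fitness 0 0, (0 : Int)))
      = (PySem.List.pyGetD fitness 0 0, (0 : Int)) := by simp
  rw [hA0, pvALoop_eq fitness (PySem.List.pyRange 1 (fitness.length : Int)) 0]
  -- B's side
  rw [PySem.List.sorted2]
  simp only [Bool.false_eq_true, if_false, List.foldl_cons, pvInsertBy_nil]
  obtain ⟨t', ht'⟩ := pvFoldInsert_head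
    (fun a b => decide ((-(PySem.List.pyGetD fitness a 0)) < (-(PySem.List.pyGetD fitness b 0))) ||
      (!decide ((-(PySem.List.pyGetD fitness b 0)) < (-(PySem.List.pyGetD fitness a 0))) && decide (a < b)))
    (PySem.List.pyRange 1 (fitness.length : Int)) 0 []
  rw [ht', PySem.List.pyGetD_zero_cons]
  rw [pvScan_eq fitness (PySem.List.pyRange 1 (fitness.length : Int)) 0 hp (fun i hi => by have := hlb i hi; omega)]
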